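-- pv_equiv track=rewrite | github.com/cosmosp2/randlot | dataproc.py | make_nums
-- ===== SOURCE A (Python) =====
-- def make_nums(cnum):
-- 	list_name=[]
-- 	for i in range(2):
--
-- 		for i in range(45):
-- 			ai=i+1
-- 			for i in range(3):
--
-- 				list_name.append(ai)
-- 			if ai < cnum:
-- 				chai=cnum-ai
-- 				chai=40-chai
-- 				for i in range(chai):
-- 					list_name.append(ai)
--
-- 			if ai > cnum:
-- 				chai=ai-cnum
-- 				chai=40-chai
-- 				for i in range(chai):
-- 					list_name.append(ai)
--
-- 			if ai == cnum:
-- 				for i in range(40):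
-- 					list_name.append(ai)
-- 	return list_name
-- ===== SOURCE B (Python) =====
-- def make_nums(cnum):
--     base = [v for v in range(1, 46) for _ in range(3)]
--     lo = cnum - 39 if cnum - 39 > 1 else 1
--     hi = cnum + 39 if cnum + 39 < 45 else 45
--     bonus = [v for v in range(lo, hi + 1)
--              for _ in range(40 - (v - cnum if v > cnum else cnum - v))]
--     half = []
--     i = j = 0
--     while i < len(base) and j < len(bonus):
--         if base[i] <= bonus[j]:
--             half.append(base[i]); i += 1
--         else:
--             half.append(bonus[j]); j += 1
--     half += base[i:] + bonus[j:]
--     return half + half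
-- ===== Notes on version B (the rewrite author's own statement) =====
-- stated objective: alternative
-- what changed: B builds two sorted lists - a base of three copies of every value 1..45 and a bonus pyramid over the clamped window [cnum-39, cnum+39] - and combines them with a two-pointer merge, instead of A's doubled loop with three per-value conditional append loops.
import Mathlib
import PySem

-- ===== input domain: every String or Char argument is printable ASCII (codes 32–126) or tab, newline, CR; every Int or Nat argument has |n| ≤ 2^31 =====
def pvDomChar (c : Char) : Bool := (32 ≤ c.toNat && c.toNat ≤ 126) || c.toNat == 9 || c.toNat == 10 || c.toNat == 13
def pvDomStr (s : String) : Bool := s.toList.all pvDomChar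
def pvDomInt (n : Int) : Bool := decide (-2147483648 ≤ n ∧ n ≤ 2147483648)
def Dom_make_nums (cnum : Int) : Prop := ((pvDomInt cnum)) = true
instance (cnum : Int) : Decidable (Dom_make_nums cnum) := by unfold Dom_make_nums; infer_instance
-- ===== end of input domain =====

-- B builds two sorted lists (a base of three copies of every value 1..45 and a bonus
-- pyramid over the clamped window [cnum-39, cnum+39]) and combines them with a
-- two-pointer merge; objective: alternative (same cost, different algorithm).

-- ===== PORT A =====
def make_nums (cnum : Int) : List Int :=
  (PySem.List.pyRange 0 2 1).foldl (fun list_name _ =>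
    (PySem.List.pyRange 0 45 1).foldl (fun list_name i =>
      let ai := i + 1
      let list_name :=
        (PySem.List.pyRange 0 3 1).foldl (fun a _ => a ++ [ai]) list_name
      let list_name :=
        if ai < cnum then
          (PySem.List.pyRange 0 (40 - (cnum - ai)) 1).foldl (fun a _ => a ++ [ai]) list_name
        else list_name
      let list_name :=
        if ai > cnum then
          (PySem.List.pyRange 0 (40 - (ai - cnum)) 1).foldl (fun a _ => a ++ [ai]) list_name
        else list_name
      if ai = cnum then
        (PySem.List.pyRange 0 40 1).foldl (fun a _ => a ++ [ai]) list_name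
      else list_name) list_name) []

-- ===== PORT B =====
-- the two-pointer while loop of Source B (including its trailing 'base[i:] + bonus[j:]'),
-- as the standard recursion over the two lists
def pvMerge : List Int → List Int → List Int
  | [], ys => ys
  | x :: xs, [] => x :: xs
  | x :: xs, y :: ys =>
      if x ≤ y then x :: pvMerge xs (y :: ys) else y :: pvMerge (x :: xs) ys

def make_nums_alt (cnum : Int) : List Int :=
  let base := (PySem.List.pyRange 1 46 1).flatMap
    (fun v => (PySem.List.pyRange 0 3 1).map (fun _ => v))
  let lo := if cnum - 39 > 1 then cnum - 39 else 1
  let hi := if cnum + 39 < 45 then cnum + 39 else 45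
  let bonus := (PySem.List.pyRange lo (hi + 1) 1).flatMap
    (fun v => (PySem.List.pyRange 0 (40 - (if v > cnum then v - cnum else cnum - v)) 1).map
      (fun _ => v))
  let half := pvMerge base bonus
  half ++ half

-- ===== PRECONDITION & SPEC =====
def Spec_make_nums (cnum : Int) (out : List Int) : Prop := out = make_nums_alt cnum
instance (cnum : Int) (out : List Int) : Decidable (Spec_make_nums cnum out) := by unfold Spec_make_nums; infer_instance

-- ===== CLAIM (what is proved, stated in full; the proofs are below) =====
def Claim_equal_make_nums : Prop := ∀ (cnum : Int), Dom_make_nums cnum → Spec_make_nums cnum (make_nums cnum)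

-- ===== LEMMAS AND PROOFS =====

-- per-value weight of one round of A's output
def pvW (cnum ai : Int) : List Int :=
  List.replicate (3 + max 0 (40 - ((ai - cnum).natAbs : Int))).toNat ai

lemma pv_flat_const (ai : Int) (l : List Int) :
    l.flatMap (fun _ => [ai]) = List.replicate l.length ai := by
  induction l with
  | nil => rfl
  | cons x xs ih => simp [List.flatMap_cons, ih, List.replicate_succ]

lemma pv_repfold (ai n : Int) (acc : List Int) :
    (PySem.List.pyRange 0 n 1).foldl (fun a _ => a ++ [ai]) acc
      = acc ++ List.replicate n.toNat ai := by
  rw [PySem.List.foldl_append_eq_flatMap (fun _ => [ai]), pv_flat_const,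
    PySem.List.length_pyRange_one]
  norm_num

lemma pv_body (cnum : Int) : (fun (list_name : List Int) (i : Int) =>
      let ai := i + 1
      let list_name :=
        (PySem.List.pyRange 0 3 1).foldl (fun a _ => a ++ [ai]) list_name
      let list_name :=
        if ai < cnum then
          (PySem.List.pyRange 0 (40 - (cnum - ai)) 1).foldl (fun a _ => a ++ [ai]) list_name
        else list_name
      let list_name :=
        if ai > cnum then
          (PySem.List.pyRange 0 (40 - (ai - cnum)) 1).foldl (fun a _ => a ++ [ai]) list_name
        else list_name
      if ai = cnum then
        (PySem.List.pyRange 0 40 1).foldl (fun a _ => a ++ [ai]) list_name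
      else list_name)
    = fun list_name i => list_name ++ pvW cnum (i + 1) := by
  funext acc i
  simp only [pv_repfold, pvW]
  split_ifs with h1 h2 h3 <;>
    first
      | (exfalso; omega)
      | (rw [List.append_assoc, ← List.replicate_add]; congr 2; omega)

lemma pv_half (cnum : Int) (acc : List Int) :
    (PySem.List.pyRange 0 45 1).foldl (fun list_name i =>
      let ai := i + 1
      let list_name :=
        (PySem.List.pyRange 0 3 1).foldl (fun a _ => a ++ [ai]) list_name
      let list_name :=
        if ai < cnum then
          (PySem.List.pyRange 0 (40 - (cnum - ai)) 1).foldl (fun a _ => a ++ [ai]) list_name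
        else list_name
      let list_name :=
        if ai > cnum then
          (PySem.List.pyRange 0 (40 - (ai - cnum)) 1).foldl (fun a _ => a ++ [ai]) list_name
        else list_name
      if ai = cnum then
        (PySem.List.pyRange 0 40 1).foldl (fun a _ => a ++ [ai]) list_name
      else list_name) acc
    = acc ++ (PySem.List.pyRange 1 46 1).flatMap (pvW cnum) := by
  rw [pv_body, PySem.List.foldl_append_eq_flatMap]
  have hshift : PySem.List.pyRange 1 46 1 = (PySem.List.pyRange 0 45 1).map (· + 1) := by
    decide
  rw [hshift, List.flatMap_map]

-- merging replicate-headed lists whose tails lie strictly above v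
lemma pv_merge_nil_right (xs : List Int) : pvMerge xs [] = xs := by
  cases xs <;> simp [pvMerge]

lemma pv_merge_rep (v : Int) (a b : Nat) (X Y : List Int)
    (hX : ∀ x ∈ X, v < x) (hY : ∀ y ∈ Y, v < y) :
    pvMerge (List.replicate a v ++ X) (List.replicate b v ++ Y)
      = List.replicate (a + b) v ++ pvMerge X Y := by
  induction a with
  | zero =>
      induction b with
      | zero => simp
      | succ b ihb =>
          simp only [List.replicate_zero, List.nil_append] at ihb ⊢
          rw [List.replicate_succ, List.cons_append]
          cases X with
          | nil => simp [pvMerge, List.replicate_succ]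
          | cons x X' =>
              have hx : v < x := hX x (by simp)
              rw [pvMerge, if_neg (by omega), ihb]
              simp [List.replicate_succ]
  | succ a iha =>
      rw [List.replicate_succ, List.cons_append]
      cases hR : List.replicate b v ++ Y with
      | nil =>
          rcases List.append_eq_nil_iff.mp hR with ⟨h1, h2⟩
          have hb : b = 0 := by simpa using congrArg List.length h1
          subst h2 hb
          simp [pv_merge_nil_right, List.replicate_succ]
      | cons r R =>
          have hr : v ≤ r := by
            rcases (List.mem_append.mp (hR ▸ (List.mem_cons_self (a := r) (l := R)))) with h | h
            · exact le_of_eq (List.eq_of_mem_replicate h).symm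
            · exact le_of_lt (hY r h)
          rw [pvMerge, if_pos hr, ← hR, iha]
          have hab : a + 1 + b = (a + b) + 1 := by omega
          rw [hab, List.replicate_succ, List.cons_append]

lemma pv_merge_flat (r : List Int) (hr : r.Pairwise (· < ·)) (a b : Int → Nat) :
    pvMerge (r.flatMap (fun v => List.replicate (a v) v))
            (r.flatMap (fun v => List.replicate (b v) v))
      = r.flatMap (fun v => List.replicate (a v + b v) v) := by
  induction r with
  | nil => simp [pvMerge]
  | cons v r' ih =>
      rcases List.pairwise_cons.mp hr with ⟨hv, hr'⟩
      have hmem : ∀ (c : Int → Nat) (x : Int),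
          x ∈ r'.flatMap (fun v => List.replicate (c v) v) → v < x := by
        intro c x hx
        rcases List.mem_flatMap.mp hx with ⟨w, hw, hxw⟩
        rw [List.eq_of_mem_replicate hxw]
        exact hv w hw
      simp only [List.flatMap_cons]
      rw [pv_merge_rep v (a v) (b v) _ _ (hmem a) (hmem b), ih hr']

-- B's bonus window, rewritten as a flatMap over the full range 1..45
lemma pv_bonus (cnum : Int) :
    (PySem.List.pyRange (if cnum - 39 > 1 then cnum - 39 else 1)
        ((if cnum + 39 < 45 then cnum + 39 else 45) + 1) 1).flatMap
      (fun v => (PySem.List.pyRange 0 (40 - (if v > cnum then v - cnum else cnum - v)) 1).map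
        (fun _ => v))
    = (PySem.List.pyRange 1 46 1).flatMap
        (fun v => List.replicate (max 0 (40 - ((v - cnum).natAbs : Int))).toNat v) := by
  set lo : Int := if cnum - 39 > 1 then cnum - 39 else 1 with hlo
  set hi : Int := if cnum + 39 < 45 then cnum + 39 else 45 with hhi
  have hinner : ∀ v : Int,
      (PySem.List.pyRange 0 (40 - (if v > cnum then v - cnum else cnum - v)) 1).map
        (fun _ => v)
      = List.replicate (40 - (if v > cnum then v - cnum else cnum - v)).toNat v := by
    intro v
    rw [List.map_const', PySem.List.length_pyRange_one]
    norm_num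
  by_cases hwin : lo ≤ hi
  · have h1 : (1 : Int) ≤ lo := by simp only [hlo]; split_ifs <;> omega
    have h46 : hi + 1 ≤ 46 := by simp only [hhi]; split_ifs <;> omega
    rw [PySem.List.pyRange_one_append 1 lo 46 h1 (by omega),
      PySem.List.pyRange_one_append lo (hi + 1) 46 (by omega) h46,
      List.flatMap_append, List.flatMap_append]
    have hout : ∀ v : Int, v ∈ PySem.List.pyRange 1 lo 1 ∨ v ∈ PySem.List.pyRange (hi + 1) 46 1 →
        (max 0 (40 - ((v - cnum).natAbs : Int))).toNat = 0 := by
      intro v hv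
      have hb : (1 ≤ v ∧ v < lo) ∨ (hi + 1 ≤ v ∧ v < 46) := by
        rcases hv with h | h
        · exact Or.inl (PySem.List.mem_pyRange_one.mp h)
        · exact Or.inr (PySem.List.mem_pyRange_one.mp h)
      have habs : 40 ≤ (v - cnum).natAbs := by
        simp only [hlo, hhi] at hb
        rcases hb with ⟨h1, h2⟩ | ⟨h1, h2⟩ <;> split_ifs at * <;> omega
      omega
    have hz1 : (PySem.List.pyRange 1 lo 1).flatMap
        (fun v => List.replicate (max 0 (40 - ((v - cnum).natAbs : Int))).toNat v) = [] := by
      apply List.flatMap_eq_nil_iff.mpr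
      intro v hv; rw [hout v (Or.inl hv)]; rfl
    have hz2 : (PySem.List.pyRange (hi + 1) 46 1).flatMap
        (fun v => List.replicate (max 0 (40 - ((v - cnum).natAbs : Int))).toNat v) = [] := by
      apply List.flatMap_eq_nil_iff.mpr
      intro v hv; rw [hout v (Or.inr hv)]; rfl
    rw [hz1, hz2, List.nil_append, List.append_nil]
    apply List.flatMap_congr
    intro v hv
    rw [hinner v]
    have hvlo := (PySem.List.mem_pyRange_one.mp hv).1
    have hvhi := (PySem.List.mem_pyRange_one.mp hv).2
    congr 1
    have : (if v > cnum then v - cnum else cnum - v) = ((v - cnum).natAbs : Int) := by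
      split_ifs <;> omega
    rw [this]
    have hle : ((v - cnum).natAbs : Int) ≤ 40 := by
      simp only [hlo, hhi] at hvlo hvhi
      split_ifs at hvlo hvhi <;> omega
    omega
  · -- empty window: both sides are []
    have hz : PySem.List.pyRange lo (hi + 1) 1 = [] :=
      PySem.List.pyRange_one_eq_nil (by omega)
    rw [hz]
    symm
    apply List.flatMap_eq_nil_iff.mpr
    intro v hv
    have hvlo := (PySem.List.mem_pyRange_one.mp hv).1
    have hvhi := (PySem.List.mem_pyRange_one.mp hv).2
    have habs : 40 ≤ (v - cnum).natAbs := by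
      simp only [hlo, hhi] at hwin
      split_ifs at hwin <;> omega
    have : (max 0 (40 - ((v - cnum).natAbs : Int))).toNat = 0 := by omega
    rw [this]; rfl

-- ===== VERDICT (by name: the statement is the Claim_ definition above) =====
theorem make_nums_spec : Claim_equal_make_nums := by
  intro cnum _
  unfold Spec_make_nums make_nums make_nums_alt
  have h2 : PySem.List.pyRange 0 2 1 = [0, 1] := by decide
  rw [h2]
  simp only [List.foldl_cons, List.foldl_nil]
  rw [pv_half, pv_half, List.nil_append]
  have hbase : (PySem.List.pyRange 1 46 1).flatMap
      (fun v => (PySem.List.pyRange 0 3 1).map (fun _ => v))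
      = (PySem.List.pyRange 1 46 1).flatMap (fun v => List.replicate 3 v) := by
    apply List.flatMap_congr
    intro v _
    rw [List.map_const', PySem.List.length_pyRange_one]
    rfl
  rw [pv_bonus, hbase,
    pv_merge_flat (PySem.List.pyRange 1 46 1) (PySem.List.pairwise_lt_pyRange_one 1 46)
      (fun _ => 3) (fun v => (max 0 (40 - ((v - cnum).natAbs : Int))).toNat)]
  have hW : pvW cnum = fun v =>
      List.replicate (3 + (max 0 (40 - ((v - cnum).natAbs : Int))).toNat) v := by
    funext v
    unfold pvW
    congr 1
    omega
  rw [hW]
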